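-- pv_equiv track=rewrite | github.com/plumppiggy/adventOfCode2025 | day5/day5.py | is_in_ranges
-- ===== SOURCE A (Python) =====
-- def is_in_ranges(num, merged_range):
--   l, r = 0, len(merged_range) - 1
--   while l <= r:
--     mid = (l + r) // 2
--     start, end = merged_range[mid]
--     if start <= num <= end:
--       return True
--     elif num < start:
--       r = mid - 1
--     else:
--       l = mid + 1
--
--   return False
-- ===== SOURCE B (Python) =====
-- def is_in_ranges(num, merged_range):
--   def go(sub):
--     if not sub:
--       return False
--     m = (len(sub) - 1) // 2
--     start, end = sub[m]
--     if start <= num <= end: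
--       return True
--     if num < start:
--       return go(sub[:m])
--     return go(sub[m + 1:])
--   return go(merged_range)
-- ===== Notes on version B (the rewrite author's own statement) =====
-- stated objective: alternative
-- what changed: Replaced the iterative two-index binary-search loop with a recursive divide-and-conquer helper that inspects the middle element of a list slice and recurses on the left or right sub-slice; it probes exactly the same elements in the same order, so behaviour matches A on every input.
import Mathlib
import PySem

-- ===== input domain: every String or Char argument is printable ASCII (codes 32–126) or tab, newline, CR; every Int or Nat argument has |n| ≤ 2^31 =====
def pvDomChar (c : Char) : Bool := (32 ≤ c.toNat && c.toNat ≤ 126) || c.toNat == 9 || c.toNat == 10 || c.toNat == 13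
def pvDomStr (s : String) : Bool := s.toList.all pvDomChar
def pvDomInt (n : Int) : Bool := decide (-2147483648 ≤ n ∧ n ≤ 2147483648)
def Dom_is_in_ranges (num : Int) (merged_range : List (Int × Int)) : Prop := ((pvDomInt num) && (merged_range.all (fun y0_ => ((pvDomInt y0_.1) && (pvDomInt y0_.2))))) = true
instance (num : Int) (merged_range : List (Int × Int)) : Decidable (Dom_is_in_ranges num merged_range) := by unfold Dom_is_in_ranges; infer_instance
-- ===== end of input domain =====

-- B replaces A's iterative two-index binary-search loop by a recursive divide-and-conquer
-- helper over list slices; it probes the same elements in the same order (alternative decomposition).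

-- ===== PORT A =====
-- the while loop of A, state (l, r); merged_range[mid] is always in range when called
-- from is_in_ranges (Python never raises there), so the none branch is unreachable dead code.
def isInLoopA (num : Int) (mr : List (Int × Int)) (l r : Int) : Bool :=
  if hlr : l ≤ r then
    let mid := PySem.Int.floordiv (l + r) 2
    match PySem.List.pyGet? mr mid with
    | none => false
    | some (s, e) =>
      if s ≤ num ∧ num ≤ e then true
      else if num < s then isInLoopA num mr l (mid - 1)
      else isInLoopA num mr (mid + 1) r
  else false
termination_by (r + 1 - l).toNat
decreasing_by
  · have h := PySem.Int.floordiv_eq_ediv_of_pos (a := l + r) (b := 2) (by omega)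
    simp only [h]
    omega
  · have h := PySem.Int.floordiv_eq_ediv_of_pos (a := l + r) (b := 2) (by omega)
    simp only [h]
    omega

def is_in_ranges (num : Int) (merged_range : List (Int × Int)) : Bool :=
  isInLoopA num merged_range 0 ((merged_range.length : Int) - 1)

-- ===== PORT B =====
-- B's inner `go(sub)`: recursion on the slice
def goB (num : Int) (sub : List (Int × Int)) : Bool :=
  if hne : sub = [] then false
  else
    let m := PySem.Int.floordiv ((sub.length : Int) - 1) 2
    match PySem.List.pyGet? sub m with
    | none => false
    | some (s, e) =>
      if s ≤ num ∧ num ≤ e then true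
      else if num < s then goB num (PySem.List.slice sub none (some m))
      else goB num (PySem.List.slice sub (some (m + 1)) none)
termination_by sub.length
decreasing_by
  · have hlen : 1 ≤ (sub.length : Int) := by
      have : sub.length ≠ 0 := fun h => hne (List.eq_nil_of_length_eq_zero h)
      omega
    have h := PySem.Int.floordiv_eq_ediv_of_pos (a := (sub.length : Int) - 1) (b := 2) (by omega)
    have h0 : (0:Int) ≤ PySem.Int.floordiv ((sub.length : Int) - 1) 2 := by rw [h]; omega
    rw [PySem.List.slice_to sub h0]
    simp only [List.length_take, h]
    omega
  · have hlen : 1 ≤ (sub.length : Int) := by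
      have : sub.length ≠ 0 := fun h => hne (List.eq_nil_of_length_eq_zero h)
      omega
    have h := PySem.Int.floordiv_eq_ediv_of_pos (a := (sub.length : Int) - 1) (b := 2) (by omega)
    have h0 : (0:Int) ≤ PySem.Int.floordiv ((sub.length : Int) - 1) 2 + 1 := by rw [h]; omega
    rw [PySem.List.slice_from sub h0]
    simp only [List.length_drop, h]
    omega

def is_in_ranges_alt (num : Int) (merged_range : List (Int × Int)) : Bool :=
  goB num merged_range

-- ===== PRECONDITION & SPEC =====
def Spec_is_in_ranges (num : Int) (merged_range : List (Int × Int)) (out : Bool) : Prop := out = is_in_ranges_alt num merged_range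
instance (num : Int) (merged_range : List (Int × Int)) (out : Bool) : Decidable (Spec_is_in_ranges num merged_range out) := by unfold Spec_is_in_ranges; infer_instance

-- ===== CLAIM (what is proved, stated in full; the proofs are below) =====
def Claim_equal_is_in_ranges : Prop := ∀ (num : Int) (merged_range : List (Int × Int)), Dom_is_in_ranges num merged_range → Spec_is_in_ranges num merged_range (is_in_ranges num merged_range)

-- ===== LEMMAS AND PROOFS =====

-- Invariant: the loop on indices [l, r] computes goB on the corresponding segment of mr.
theorem loopA_eq_goB (num : Int) (mr : List (Int × Int)) :
    ∀ (n : Nat) (l r : Int), (r + 1 - l).toNat = n → 0 ≤ l → r < (mr.length : Int) →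
      isInLoopA num mr l r = goB num ((mr.drop l.toNat).take (r + 1 - l).toNat) := by
  intro n
  induction n using Nat.strong_induction_on with
  | _ n ih =>
    intro l r hn hl hr
    by_cases hlr : l ≤ r
    · -- non-empty segment
      set sub : List (Int × Int) := (mr.drop l.toNat).take (r + 1 - l).toNat with hsub
      have hlenmr : l.toNat + (r + 1 - l).toNat ≤ mr.length := by omega
      have hsublen : sub.length = (r + 1 - l).toNat := by
        simp [hsub, List.length_take, List.length_drop]
        omega
      have hne : sub ≠ [] := by
        intro h
        rw [h] at hsublen
        simp at hsublen
        omega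
      -- midpoints
      set mid : Int := PySem.Int.floordiv (l + r) 2 with hmid
      have hmidc : mid = (l + r) / 2 := by
        rw [hmid, PySem.Int.floordiv_eq_ediv_of_pos (by omega)]
      set mB : Int := PySem.Int.floordiv ((sub.length : Int) - 1) 2 with hmB
      have hmBc : mB = ((sub.length : Int) - 1) / 2 := by
        rw [hmB, PySem.Int.floordiv_eq_ediv_of_pos (by omega)]
      have hrel : mid = l + mB := by
        rw [hmidc, hmBc, hsublen]; omega
      have hmB0 : 0 ≤ mB := by rw [hmBc, hsublen]; omega
      have hmBlt : mB < (sub.length : Int) := by rw [hmBc]; omega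
      have hmidb : l ≤ mid ∧ mid ≤ r := by rw [hmidc]; omega
      clear_value mid mB
      -- the probed element is the same in both programs
      have hgetA : PySem.List.pyGet? mr mid = mr[mid.toNat]? :=
        PySem.List.pyGet?_of_nonneg mr (by omega)
      have hgetB : PySem.List.pyGet? sub mB = sub[mB.toNat]? :=
        PySem.List.pyGet?_of_nonneg sub hmB0
      have hseg : sub[mB.toNat]? = mr[mid.toNat]? := by
        rw [hsub, List.getElem?_take]
        have hc : mB.toNat < (r + 1 - l).toNat := by omega
        rw [if_pos hc, List.getElem?_drop]
        congr 1
        omega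
      have hmidlt : mid.toNat < mr.length := by omega
      obtain ⟨⟨s, e⟩, hsome⟩ : ∃ p, mr[mid.toNat]? = some p :=
        ⟨mr[mid.toNat], List.getElem?_eq_getElem hmidlt⟩
      -- unfold both one step
      rw [isInLoopA, dif_pos hlr, goB, dif_neg hne]
      simp only [← hmid, ← hmB, hgetA, hgetB, hseg, hsome]
      by_cases hin : s ≤ num ∧ num ≤ e
      · simp [hin]
      · simp only [if_neg hin]
        by_cases hlt : num < s
        · -- left half: indices [l, mid-1] vs slice sub[:mB]
          simp only [if_pos hlt]
          have hleft : PySem.List.slice sub none (some mB) =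
              (mr.drop l.toNat).take (mid - 1 + 1 - l).toNat := by
            rw [PySem.List.slice_to _ hmB0, hsub, List.take_take]
            congr 1
            omega
          rw [ih (mid - 1 + 1 - l).toNat (by omega) l (mid - 1) rfl hl (by omega), hleft]
        · -- right half: indices [mid+1, r] vs slice sub[mB+1:]
          simp only [if_neg hlt]
          have hright : PySem.List.slice sub (some (mB + 1)) none =
              (mr.drop (mid + 1).toNat).take (r + 1 - (mid + 1)).toNat := by
            rw [PySem.List.slice_from _ (by omega), hsub, List.drop_take, List.drop_drop]
            have e1 : (r + 1 - l).toNat - (mB + 1).toNat = (r + 1 - (mid + 1)).toNat := by omega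
            have e2 : l.toNat + (mB + 1).toNat = (mid + 1).toNat := by omega
            rw [e1, e2]
          rw [ih (r + 1 - (mid + 1)).toNat (by omega) (mid + 1) r rfl (by omega) hr, hright]
    · -- empty segment
      rw [isInLoopA, dif_neg hlr]
      have h0 : (r + 1 - l).toNat = 0 := by omega
      rw [h0]
      simp [goB]

-- ===== VERDICT (by name: the statement is the Claim_ definition above) =====
theorem is_in_ranges_spec : Claim_equal_is_in_ranges := by
  intro num mr _
  unfold Spec_is_in_ranges is_in_ranges is_in_ranges_alt
  rw [loopA_eq_goB num mr ((mr.length : Int) - 1 + 1 - 0).toNat 0 ((mr.length : Int) - 1)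
    rfl le_rfl (by omega)]
  congr 1
  simp
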